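-- pv_equiv track=rewrite | github.com/LesyaLesya/codewars_python | 7kyu.py | mutate_my_strings
-- ===== SOURCE A (Python) =====
-- def mutate_my_strings(s1,s2):
--     res = f'{s1}\n'
--     s1 = list(s1)
--     s2 = list(s2)
--     for idx, value in enumerate(s1):
--         if s1[idx] != s2[idx]:
--             s1[idx] = s2[idx]
--             res += f'{"".join(s1)}\n'
--     return res
-- ===== SOURCE B (Python) =====
-- def mutate_my_strings(s1, s2):
--     res = f'{s1}\n'
--     for idx in range(len(s1)):
--         if s1[idx] != s2[idx]:
--             res += f'{s2[:idx+1]}{s1[idx+1:]}\n'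
--     return res
-- ===== Notes on version B (the rewrite author's own statement) =====
-- stated objective: simpler
-- what changed: Each output line is computed statelessly as s2[:idx+1] + s1[idx+1:] from the original strings, eliminating A's maintained mutable character list.
import Mathlib
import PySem

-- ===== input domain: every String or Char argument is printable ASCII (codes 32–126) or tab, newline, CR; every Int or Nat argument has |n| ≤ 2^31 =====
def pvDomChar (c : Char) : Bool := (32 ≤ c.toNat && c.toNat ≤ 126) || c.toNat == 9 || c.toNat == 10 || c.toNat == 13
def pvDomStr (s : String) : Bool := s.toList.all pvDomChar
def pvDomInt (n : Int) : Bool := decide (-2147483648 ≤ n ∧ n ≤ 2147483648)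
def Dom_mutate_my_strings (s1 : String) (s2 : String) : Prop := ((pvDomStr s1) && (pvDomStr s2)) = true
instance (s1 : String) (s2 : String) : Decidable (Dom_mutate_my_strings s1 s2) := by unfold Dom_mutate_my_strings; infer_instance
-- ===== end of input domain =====

-- B computes each emitted line statelessly as s2[:idx+1] + s1[idx+1:] instead of maintaining A's mutable character list (objective: simpler).

-- ===== PORT A =====
def mutate_my_strings (s1 : String) (s2 : String) : String :=
  String.mk ((PySem.List.enumerate s1.toList 0).foldl
    (fun (st : List Char × List Char) iv =>
      if PySem.List.pyGetD st.1 iv.1 ' ' ≠ PySem.List.pyGetD s2.toList iv.1 ' ' then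
        let m := PySem.List.pySetD st.1 iv.1 (PySem.List.pyGetD s2.toList iv.1 ' ')
        (m, st.2 ++ m ++ ['\n'])
      else st)
    (s1.toList, s1.toList ++ ['\n'])).2

-- ===== PORT B =====
def mutate_my_strings_alt (s1 : String) (s2 : String) : String :=
  String.mk ((PySem.List.pyRange 0 s1.toList.length 1).foldl
    (fun res idx =>
      if PySem.List.pyGetD s1.toList idx ' ' ≠ PySem.List.pyGetD s2.toList idx ' ' then
        res ++ PySem.List.slice s2.toList none (some (idx + 1)) ++ PySem.List.slice s1.toList (some (idx + 1)) none ++ ['\n']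
      else res)
    (s1.toList ++ ['\n']))

-- ===== PRECONDITION & SPEC =====
-- Pre_ excludes s2 shorter than s1: there Python A raises IndexError at the first index past s2's end (and B raises identically).
def Pre_mutate_my_strings (s1 : String) (s2 : String) : Prop := s1.toList.length ≤ s2.toList.length
instance (s1 : String) (s2 : String) : Decidable (Pre_mutate_my_strings s1 s2) := by unfold Pre_mutate_my_strings; infer_instance
def pvWitness_mutate_my_strings : String × String := ("abc", "axc")
def Spec_mutate_my_strings (s1 : String) (s2 : String) (out : String) : Prop := out = mutate_my_strings_alt s1 s2
instance (s1 : String) (s2 : String) (out : String) : Decidable (Spec_mutate_my_strings s1 s2 out) := by unfold Spec_mutate_my_strings; infer_instance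

-- ===== CLAIM (what is proved, stated in full; the proofs are below) =====
def Claim_equal_mutate_my_strings : Prop := ∀ (s1 : String) (s2 : String), Dom_mutate_my_strings s1 s2 → Pre_mutate_my_strings s1 s2 → Spec_mutate_my_strings s1 s2 (mutate_my_strings s1 s2)

-- ===== LEMMAS AND PROOFS =====

lemma pv_set_at_len (l t : List Char) (c x : Char) {k : Nat} (h : l.length = k) :
    (l ++ c :: t).set k x = l ++ x :: t := by
  simp [h]

-- Invariant: after processing indices < k, A's mutated list is l2.take k ++ l1.drop k and the
-- accumulated text of both programs agree; proved by induction on the remaining suffix.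
lemma mutate_loop_eq (l1 l2 : List Char) (hlen : l1.length ≤ l2.length) :
    ∀ (t : List Char) (k : Nat) (res : List Char), l1.drop k = t →
    ((PySem.List.enumerate t (k : Int)).foldl
      (fun (st : List Char × List Char) iv =>
        if PySem.List.pyGetD st.1 iv.1 ' ' ≠ PySem.List.pyGetD l2 iv.1 ' ' then
          let m := PySem.List.pySetD st.1 iv.1 (PySem.List.pyGetD l2 iv.1 ' ')
          (m, st.2 ++ m ++ ['\n'])
        else st)
      (l2.take k ++ t, res)).2
    = (List.range' k t.length).foldl
      (fun res idx =>
        if l1.getD idx ' ' ≠ l2.getD idx ' ' then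
          res ++ l2.take (idx + 1) ++ l1.drop (idx + 1) ++ ['\n']
        else res) res := by
  intro t
  induction t with
  | nil => intro k res _; simp [PySem.List.enumerate]
  | cons c t' ih =>
    intro k res hdrop
    have hk : k < l1.length := by
      by_contra h
      simp [List.drop_eq_nil_of_le (Nat.le_of_not_lt h)] at hdrop
    have hk2 : k < l2.length := Nat.lt_of_lt_of_le hk hlen
    have hc : l1[k] = c := by
      have h0 := congrArg (fun l => l[0]?) hdrop
      simpa [List.getElem?_drop, List.getElem?_eq_getElem hk] using h0
    have ht' : l1.drop (k + 1) = t' := by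
      have h0 := congrArg List.tail hdrop
      simpa [List.tail_drop] using h0
    have hlentake : (l2.take k).length = k := by simp [Nat.le_of_lt hk2]
    have htake : l2.take k ++ l2[k] :: t' = l2.take (k + 1) ++ t' := by
      rw [List.take_add_one, List.getElem?_eq_getElem hk2]
      simp only [Option.toList_some, List.append_assoc, List.singleton_append]
    have hset : (l2.take k ++ c :: t').set k l2[k] = l2.take (k + 1) ++ t' := by
      rw [pv_set_at_len (l2.take k) t' c l2[k] hlentake, htake]
    have hg1 : (l2.take k ++ c :: t').getD k ' ' = c := by
      simp [List.getD, hlentake]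
    have hg2 : l2.getD k ' ' = l2[k] := by
      simp [List.getD_eq_getElem?_getD, List.getElem?_eq_getElem hk2]
    have hg3 : l1.getD k ' ' = c := by
      simp [List.getD_eq_getElem?_getD, List.getElem?_eq_getElem hk, hc]
    rw [PySem.List.enumerate_cons, show (c :: t').length = t'.length + 1 from rfl,
      List.range'_succ]
    simp only [List.foldl_cons, PySem.List.pyGetD_natCast, PySem.List.pySetD_natCast,
      hg1, hg2, hg3]
    by_cases hceq : c = l2[k]
    · simp only [hceq, ne_eq, not_true_eq_false, if_false]
      rw [htake, show ((k : Int) + 1) = ((k + 1 : Nat) : Int) by push_cast; ring]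
      exact ih (k + 1) res ht'
    · simp only [ne_eq, hceq, not_false_eq_true, if_true, hset]
      rw [show ((k : Int) + 1) = ((k + 1 : Nat) : Int) by push_cast; ring,
        ih (k + 1) (res ++ (l2.take (k + 1) ++ t') ++ ['\n']) ht']
      congr 1
      simp [ht']

-- ===== VERDICT (by name: the statement is the Claim_ definition above) =====
theorem mutate_my_strings_spec : Claim_equal_mutate_my_strings := by
  intro s1 s2 _ hpre
  have hpre' : s1.toList.length ≤ s2.toList.length := hpre
  unfold Spec_mutate_my_strings mutate_my_strings mutate_my_strings_alt
  congr 1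
  have hB : (PySem.List.pyRange 0 (s1.toList.length : Int) 1).foldl
      (fun res idx =>
        if PySem.List.pyGetD s1.toList idx ' ' ≠ PySem.List.pyGetD s2.toList idx ' ' then
          res ++ PySem.List.slice s2.toList none (some (idx + 1)) ++ PySem.List.slice s1.toList (some (idx + 1)) none ++ ['\n']
        else res)
      (s1.toList ++ ['\n'])
    = (List.range' 0 s1.toList.length).foldl
      (fun res idx =>
        if s1.toList.getD idx ' ' ≠ s2.toList.getD idx ' ' then
          res ++ s2.toList.take (idx + 1) ++ s1.toList.drop (idx + 1) ++ ['\n']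
        else res) (s1.toList ++ ['\n']) := by
    rw [PySem.List.pyRange_zero_natCast, List.foldl_map, List.range_eq_range']
    apply PySem.List.foldl_congr_mem
    intro a x _
    have hcast : ((x : Int) + 1) = ((x + 1 : Nat) : Int) := by push_cast; ring
    simp only [hcast, PySem.List.slice_to_natCast, PySem.List.slice_from_natCast,
      PySem.List.pyGetD_natCast, List.getD_eq_getElem?_getD]
  rw [hB]
  have hA := mutate_loop_eq s1.toList s2.toList hpre' s1.toList 0 (s1.toList ++ ['\n']) (by simp)
  simp only [List.take_zero, List.nil_append, Nat.cast_zero] at hA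
  exact hA
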